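-- pv_equiv track=rewrite | github.com/mgodoydiaz/TareaDE_apachebeam | scripts/pipeline.py | normalize_and_filter
-- ===== SOURCE A (Python) =====
-- def normalize_and_filter(element):
--     """Funcion para normalizar el campo Race ID, pasando todo a minusculas, y quitar espacios y guiones bajos.
--     Además se filtran los registros que DeviceType es distinto de 'Other'."""
--     # Normal
--     race_id = element.get('RaceID', '')
--     if race_id:
--         dic_replace = {" ": "", "_": "", "-": "", ":": ""}
--         for old, new in dic_replace.items():
--             race_id = race_id.replace(old, new)
--         element['RaceID'] = race_id.strip().lower()
--     # Filtrado distinto de other y distinto de None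
--     if element.get('DeviceType', '').lower() != 'other':
--         return element
-- ===== SOURCE B (Python) =====
-- def normalize_and_filter(element):
--     """Filter-first, purely functional rebuild: drop filtered records up front,
--     then build a fresh output dict with a comprehension that normalizes the
--     RaceID value in one character pass (no in-place mutation, unlike A)."""
--     if element.get('DeviceType', '').lower() == 'other':
--         return None
--     return {
--         k: (''.join(c for c in v if c not in ' _-:').strip().lower()
--             if k == 'RaceID' and v else v)
--         for k, v in element.items()
--     }
-- ===== Notes on version B (the rewrite author's own statement) =====
-- stated objective: alternative
-- what changed: B inverts the control flow (filter check first, early None) and builds a fresh output dict with a comprehension that normalizes RaceID in one character-filtering pass, instead of A's four sequential str.replace passes followed by in-place mutation; equivalence is about the return value only (B does not mutate its argument).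
import Mathlib
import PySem

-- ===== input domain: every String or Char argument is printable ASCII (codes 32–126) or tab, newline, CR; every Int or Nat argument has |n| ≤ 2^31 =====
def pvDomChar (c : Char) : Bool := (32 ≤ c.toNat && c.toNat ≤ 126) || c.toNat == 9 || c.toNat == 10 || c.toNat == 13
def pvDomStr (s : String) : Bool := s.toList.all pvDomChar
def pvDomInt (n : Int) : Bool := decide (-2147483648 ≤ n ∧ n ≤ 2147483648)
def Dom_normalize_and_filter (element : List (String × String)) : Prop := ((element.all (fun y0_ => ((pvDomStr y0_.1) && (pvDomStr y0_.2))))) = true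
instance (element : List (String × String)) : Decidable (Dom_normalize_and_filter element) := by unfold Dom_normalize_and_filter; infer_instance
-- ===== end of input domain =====

-- B inverts the control flow (DeviceType filter first) and rebuilds the dict with a comprehension
-- normalizing RaceID in one character pass instead of four replace passes; A mutates its argument
-- in place while B does not — the theorems below are about the RETURN value only.

-- ===== PORT A =====
def normalize_and_filter (element : List (String × String)) : Option (List (String × String)) :=
  let d := PySem.Dict.mk element
  let race_id := d.getD "RaceID" ""
  let d' :=
    if race_id ≠ "" then
      let race_id' :=
        [(" ", ""), ("_", ""), ("-", ""), (":", "")].foldl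
          (fun r (p : String × String) => PySem.Str.replace r p.1 p.2) race_id
      d.insert "RaceID" (PySem.Str.lower (PySem.Str.strip race_id'))
    else d
  if PySem.Str.lower (d'.getD "DeviceType" "") ≠ "other" then some d'.items else none

-- ===== PORT B =====
-- ''.join(c for c in v if c not in ' _-:').strip().lower()  — ' _-:' membership is membership
-- in its character list [' ', '_', '-', ':']
def pvNormB (v : String) : String :=
  PySem.Str.lower (PySem.Str.strip
    (String.ofList (v.toList.filter (fun c => !([' ', '_', '-', ':'].contains c)))))

def normalize_and_filter_alt (element : List (String × String)) : Option (List (String × String)) :=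
  let d := PySem.Dict.mk element
  if PySem.Str.lower (d.getD "DeviceType" "") = "other" then none
  else
    -- dict comprehension over element.items(): successive inserts into a fresh dict
    some ((d.items.foldl
      (fun acc kv =>
        acc.insert kv.1 (if kv.1 = "RaceID" ∧ kv.2 ≠ "" then pvNormB kv.2 else kv.2))
      PySem.Dict.empty).items)

-- ===== PRECONDITION & SPEC =====
-- The Python argument is a dict, so its association-list image cannot repeat keys: Pre_ only
-- excludes assoc lists with duplicate keys, which represent no Python dict at all.
def Pre_normalize_and_filter (element : List (String × String)) : Prop :=
  (element.map Prod.fst).Nodup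
instance (element : List (String × String)) : Decidable (Pre_normalize_and_filter element) := by unfold Pre_normalize_and_filter; infer_instance

def pvWitness_normalize_and_filter : (List (String × String)) :=
  [("RaceID", " A_B-c "), ("DeviceType", "Phone")]

def Spec_normalize_and_filter (element : List (String × String)) (out : Option (List (String × String))) : Prop := out = normalize_and_filter_alt element
instance (element : List (String × String)) (out : Option (List (String × String))) : Decidable (Spec_normalize_and_filter element out) := by unfold Spec_normalize_and_filter; infer_instance

-- ===== CLAIM (what is proved, stated in full; the proofs are below) =====
def Claim_equal_normalize_and_filter : Prop := ∀ (element : List (String × String)), Dom_normalize_and_filter element → Pre_normalize_and_filter element → Spec_normalize_and_filter element (normalize_and_filter element)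

-- ===== LEMMAS AND PROOFS =====

-- replace.go with a one-character pattern and empty replacement removes exactly that character
theorem replace_go_single (c : Char) (l acc : List Char) (fuel : Nat) (h : l.length ≤ fuel) :
    PySem.Chars.replace.go [c] [] fuel l acc = acc.reverse ++ l.filter (fun x => x != c) := by
  induction l generalizing acc fuel with
  | nil =>
      cases fuel <;> simp [PySem.Chars.replace.go]
  | cons a t ih =>
      cases fuel with
      | zero => simp at h
      | succ f =>
        simp only [PySem.Chars.replace.go]
        by_cases hc : c = a
        · subst hc
          simp only [List.isPrefixOf, List.length_cons] at *
          simp [ih acc f (by omega)]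
        · have : List.isPrefixOf [c] (a :: t) = false := by
            simp [List.isPrefixOf, hc]
          simp only [this, if_neg Bool.false_ne_true]
          rw [ih (a :: acc) f (by simpa using h)]
          simp [Ne.symm hc]

theorem replace_single (c : Char) (s : List Char) :
    PySem.Chars.replace s [c] [] = s.filter (fun x => x != c) := by
  rw [PySem.Chars.replace]
  simp [replace_go_single c s [] s.length (le_refl _)]

-- A's four-pass replace loop computes exactly B's single filtering pass
theorem fold_replace_eq_filter (s : String) :
    ([(" ", ""), ("_", ""), ("-", ""), (":", "")].foldl
        (fun r (p : String × String) => PySem.Str.replace r p.1 p.2) s) =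
      String.ofList (s.toList.filter (fun c => !([' ', '_', '-', ':'].contains c))) := by
  have h : ∀ (t : String) (c : Char), PySem.Str.replace t (String.ofList [c]) "" =
      String.ofList (t.toList.filter (fun x => x != c)) := by
    intro t c
    apply String.toList_injective
    simp only [PySem.Str.toList_replace, String.toList_ofList]
    simpa using replace_single c t.toList
  show PySem.Str.replace (PySem.Str.replace (PySem.Str.replace (PySem.Str.replace s " " "") "_" "") "-" "") ":" "" = _
  have sp : (" " : String) = String.ofList [' '] := rfl
  have un : ("_" : String) = String.ofList ['_'] := rfl
  have da : ("-" : String) = String.ofList ['-'] := rfl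
  have co : (":" : String) = String.ofList [':'] := rfl
  rw [sp, un, da, co, h, h, h, h]
  simp only [String.toList_ofList, List.filter_filter]
  congr 1
  apply List.filter_congr
  intro x _
  cases Decidable.em (x = ' ') <;> cases Decidable.em (x = '_') <;>
    cases Decidable.em (x = '-') <;> cases Decidable.em (x = ':') <;>
    simp_all

-- B's comprehension fold appends one freshly-keyed entry per input entry
theorem comprehension_items (d : PySem.Dict String String) (hnd : d.keys.Nodup) :
    ((d.items.foldl
        (fun acc kv =>
          acc.insert kv.1 (if kv.1 = "RaceID" ∧ kv.2 ≠ "" then pvNormB kv.2 else kv.2))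
        PySem.Dict.empty).items) =
      d.items.map (fun kv => (kv.1, if kv.1 = "RaceID" ∧ kv.2 ≠ "" then pvNormB kv.2 else kv.2)) := by
  have h := PySem.Dict.items_foldl_insert_fresh d.items (fun kv => kv.1)
      (fun kv => if kv.1 = "RaceID" ∧ kv.2 ≠ "" then pvNormB kv.2 else kv.2)
      PySem.Dict.empty
      (by intro a _; simp [PySem.Dict.contains_empty])
      (by simpa [PySem.Dict.keys] using hnd)
  simpa [PySem.Dict.empty] using h

-- ===== VERDICT (by name: the statement is the Claim_ definition above) =====
theorem normalize_and_filter_spec : Claim_equal_normalize_and_filter := by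
  intro element _ hpre
  unfold Spec_normalize_and_filter normalize_and_filter normalize_and_filter_alt
  dsimp only []
  have hnd : (PySem.Dict.mk element).keys.Nodup := by
    simpa [PySem.Dict.keys, PySem.Dict.mk, Function.comp] using hpre
  set d := PySem.Dict.mk element with hd
  by_cases hr : d.getD "RaceID" "" ≠ ""
  · -- RaceID present with a non-empty value
    have hget : d.get? "RaceID" = some (d.getD "RaceID" "") := by
      rcases h : d.get? "RaceID" with _ | v
      · exact absurd (by simp [PySem.Dict.getD_eq_get?_getD, h]) hr
      · simp [PySem.Dict.getD_eq_get?_getD, h]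
    have hcont : d.contains "RaceID" = true := by
      rw [PySem.Dict.contains_eq_isSome_get?, hget]; rfl
    rw [if_pos hr,
        PySem.Dict.getD_insert_of_ne (k := "RaceID") (k' := "DeviceType") d _ "" (by decide)]
    by_cases hdev : PySem.Str.lower (d.getD "DeviceType" "") = "other"
    · rw [if_neg (by simp [hdev]), if_pos hdev]
    · rw [if_pos hdev, if_neg hdev]
      rw [comprehension_items d hnd, PySem.Dict.items_insert_of_contains d _ hcont]
      congr 1
      apply List.map_congr_left
      intro p hp
      by_cases hk : p.1 = "RaceID"
      · have hv : p.2 = d.getD "RaceID" "" := by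
          have h2 : d.get? p.1 = some p.2 :=
            PySem.Dict.get?_of_mem_items d (by simpa using hp) hnd
          rw [hk, hget] at h2
          exact (Option.some.inj h2).symm
        have hb : (p.1 == "RaceID") = true := by simp [hk]
        rw [if_pos hb, if_pos ⟨hk, by rw [hv]; exact hr⟩, hv, fold_replace_eq_filter]
        simp only [pvNormB, hk]
      · have hb : (p.1 == "RaceID") = false := by simp [hk]
        simp [hb, hk]
  · -- RaceID absent or empty: A leaves the dict unchanged, B's comprehension is the identity
    rw [if_neg hr]
    by_cases hdev : PySem.Str.lower (d.getD "DeviceType" "") = "other"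
    · rw [if_neg (by simp [hdev]), if_pos hdev]
    · rw [if_pos hdev, if_neg hdev]
      rw [comprehension_items d hnd]
      have hid : ∀ p ∈ d.items,
          (fun kv : String × String =>
            (kv.1, if kv.1 = "RaceID" ∧ kv.2 ≠ "" then pvNormB kv.2 else kv.2)) p = id p := by
        intro p hp
        by_cases hk : p.1 = "RaceID"
        · have h2 : d.get? p.1 = some p.2 :=
            PySem.Dict.get?_of_mem_items d (by simpa using hp) hnd
          have h2' : d.get? "RaceID" = some p.2 := hk ▸ h2
          have hv : p.2 = "" := by
            have h3 := PySem.Dict.getD_eq_get?_getD d "RaceID" ""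
            rw [h2', Option.getD_some] at h3
            exact h3.symm.trans (not_not.mp hr)
          show (p.1, if p.1 = "RaceID" ∧ p.2 ≠ "" then pvNormB p.2 else p.2) = p
          rw [if_neg (by simp [hv])]
        · simp [hk]
      rw [List.map_congr_left hid, List.map_id]
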